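-- pv_equiv track=rewrite | github.com/bavalpey/codefights | core/mirrorLake/mostFrequentDigitSum.py | mostFrequentDigitSum
-- ===== SOURCE A (Python) =====
-- def mode(array):
--     most = max(list(map(array.count, array)))
--     return list(set(filter(lambda x: array.count(x) == most, array)))
--
-- def mostFrequentDigitSum(n):
--     digitsequence = []
--     digitsum = -1
--     while digitsum != 0:
--         digitsum = sum(int(x) for x in str(n))
--         n -= digitsum
--         digitsequence.append(digitsum)
--     return max(mode(digitsequence))
-- ===== SOURCE B (Python) =====
-- def mostFrequentDigitSum(n):
--     seq = []
--     s = -1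
--     while s != 0:
--         s = sum(int(c) for c in str(n))
--         n -= s
--         seq.append(s)
--     # mode via sort + single run sweep: equal values are adjacent after sorting,
--     # so a run length is a count; '>=' lets later (larger) values win ties.
--     seq.sort()
--     best_val = prev = seq[0]
--     best_run = run = 1
--     for x in seq[1:]:
--         if x == prev:
--             run += 1
--         else:
--             run = 1
--             prev = x
--         if run >= best_run:
--             best_run = run
--             best_val = x
--     return best_val
-- ===== Notes on version B (the rewrite author's own statement) =====
-- stated objective: faster
-- what changed: B computes the mode by sorting the collected digit-sum list and sweeping it once over runs of equal values (run length = count, '>=' makes the largest tied value win), replacing A's mode that rescans the list with .count for every element and then builds a set and filters it.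
import Mathlib
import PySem

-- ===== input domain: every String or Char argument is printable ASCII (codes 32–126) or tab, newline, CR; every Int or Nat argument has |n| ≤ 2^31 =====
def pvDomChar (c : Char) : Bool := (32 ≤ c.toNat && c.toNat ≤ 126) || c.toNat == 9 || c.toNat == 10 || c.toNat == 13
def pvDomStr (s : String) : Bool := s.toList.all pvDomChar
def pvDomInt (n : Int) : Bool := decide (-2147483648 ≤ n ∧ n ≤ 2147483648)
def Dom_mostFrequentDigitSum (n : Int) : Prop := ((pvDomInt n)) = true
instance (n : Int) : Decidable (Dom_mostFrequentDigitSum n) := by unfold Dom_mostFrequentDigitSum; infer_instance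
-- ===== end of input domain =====

-- B replaces A's repeated-.count mode (plus set/filter) by sorting the digit-sum list once
-- and sweeping runs of equal values (run length = count, '>=' lets the largest tied value win): faster.

-- ===== PORT A =====
-- sum(int(x) for x in str(n)); on Pre_ (0 ≤ n) every character of str(n) is a digit,
-- so int(x) never raises and the `getD 0` is never taken.
def pvDigitSum (n : Int) : Int :=
  ((PySem.Int.toStr n).toList.map (fun c => (PySem.Int.ofStr? (String.ofList [c])).getD 0)).sum

-- A's `while digitsum != 0` loop: compute the digit sum, subtract, append, repeat while ≠ 0.
-- The fuel only totalises the loop: on 0 ≤ n it subtracts ≥ 1 each non-final step, so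
-- n.toNat + 1 iterations always suffice.
def pvLoopA : Nat → Int → List Int → List Int
  | 0, _, acc => acc
  | fuel + 1, n, acc =>
    let d := pvDigitSum n
    if d = 0 then acc ++ [d]
    else pvLoopA fuel (n - d) (acc ++ [d])

def mostFrequentDigitSum (n : Int) : Int :=
  let seq := pvLoopA (n.toNat + 1) n []
  -- mode: most = max(list(map(array.count, array)))  (seq is never empty, so max never raises)
  let most := (PySem.List.max? (seq.map (fun x => (PySem.List.count seq x : Int))) (fun y => y)).getD 0
  -- list(set(filter(lambda x: array.count(x) == most, array)))
  let modes := PySem.Set.ofList (seq.filter (fun x => (PySem.List.count seq x : Int) == most))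
  -- max(mode(...))  (modes is never empty)
  (PySem.List.max? modes (fun y => y)).getD 0

-- ===== PORT B =====
-- B's builder loop (`s = -1; while s != 0: …`), same fuel totalisation as A's.
def pvLoopB : Nat → Int → List Int → List Int
  | 0, _, acc => acc
  | fuel + 1, n, acc =>
    let s := pvDigitSum n
    if s = 0 then acc ++ [s]
    else pvLoopB fuel (n - s) (acc ++ [s])

-- one step of B's for-loop over the sorted tail; state = (prev, run, best_run, best_val)
def pvSweepStep (st : Int × Int × Int × Int) (x : Int) : Int × Int × Int × Int :=
  let run' := if x = st.1 then st.2.1 + 1 else 1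
  if run' ≥ st.2.2.1 then (x, run', run', x) else (x, run', st.2.2.1, st.2.2.2)

def mostFrequentDigitSum_alt (n : Int) : Int :=
  let seq := pvLoopB (n.toNat + 1) n []
  let s := PySem.List.sorted seq (fun x => x) false   -- seq.sort()
  match s with
  | [] => 0    -- unreachable: the sequence is never empty
  | h :: t => (t.foldl pvSweepStep (h, 1, 1, h)).2.2.2

-- ===== PRECONDITION & SPEC =====
-- Pre_ excludes negative n, on which A raises ValueError (str(n) starts with '-', int('-') raises).
def Pre_mostFrequentDigitSum (n : Int) : Prop := 0 ≤ n
instance (n : Int) : Decidable (Pre_mostFrequentDigitSum n) := by unfold Pre_mostFrequentDigitSum; infer_instance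
def pvWitness_mostFrequentDigitSum : Int := (39)
def Spec_mostFrequentDigitSum (n : Int) (out : Int) : Prop := out = mostFrequentDigitSum_alt n
instance (n : Int) (out : Int) : Decidable (Spec_mostFrequentDigitSum n out) := by unfold Spec_mostFrequentDigitSum; infer_instance

-- ===== CLAIM (what is proved, stated in full; the proofs are below) =====
def Claim_equal_mostFrequentDigitSum : Prop := ∀ (n : Int), Dom_mostFrequentDigitSum n → Pre_mostFrequentDigitSum n → Spec_mostFrequentDigitSum n (mostFrequentDigitSum n)

-- ===== LEMMAS AND PROOFS =====

-- B's loop is A's loop (identical builders; they are kept separate because each port transcribes its own Python).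
theorem pvLoopB_eq_loopA (fuel : Nat) : ∀ (n : Int) (acc : List Int),
    pvLoopB fuel n acc = pvLoopA fuel n acc := by
  induction fuel with
  | zero => intro n acc; rfl
  | succ k ih =>
    intro n acc
    simp only [pvLoopA, pvLoopB]
    by_cases h : pvDigitSum n = 0
    · simp [h]
    · simp [h, ih]

-- A's loop threads its accumulator by appending.
theorem pvLoopA_acc (fuel : Nat) : ∀ (n : Int) (acc : List Int),
    pvLoopA fuel n acc = acc ++ pvLoopA fuel n [] := by
  induction fuel with
  | zero => intro n acc; simp [pvLoopA]
  | succ k ih =>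
    intro n acc
    simp only [pvLoopA]
    by_cases h : pvDigitSum n = 0
    · simp [h]
    · simp only [h, if_false]
      rw [ih (n - pvDigitSum n) (acc ++ [pvDigitSum n]),
          ih (n - pvDigitSum n) ([] ++ [pvDigitSum n])]
      simp

theorem pvLoopA_ne_nil (fuel : Nat) (n : Int) : pvLoopA (fuel + 1) n [] ≠ [] := by
  simp only [pvLoopA]
  by_cases h : pvDigitSum n = 0
  · simp [h]
  · simp only [h, if_false]
    rw [pvLoopA_acc]
    simp

-- the value both sides compute: a most frequent element of L, largest among ties
def pvIsAns (L : List Int) (v : Int) : Prop :=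
  v ∈ L ∧ (∀ y ∈ L, L.count y ≤ L.count v) ∧ (∀ y ∈ L, L.count y = L.count v → y ≤ v)

theorem pvIsAns_unique (L : List Int) (v w : Int) (hv : pvIsAns L v) (hw : pvIsAns L w) : v = w := by
  obtain ⟨hv1, hv2, hv3⟩ := hv
  obtain ⟨hw1, hw2, hw3⟩ := hw
  have h1 : L.count v = L.count w := le_antisymm (hw2 v hv1) (hv2 w hw1)
  have h2 : v ≤ w := hw3 v hv1 h1
  have h3 : w ≤ v := hv3 w hw1 h1.symm
  omega

-- pvIsAns transfers along permutations (counts and membership are permutation-invariant)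
theorem pvIsAns_of_perm (L S : List Int) (hp : S.Perm L) (v : Int) (h : pvIsAns S v) :
    pvIsAns L v := by
  obtain ⟨h1, h2, h3⟩ := h
  refine ⟨hp.mem_iff.mp h1, ?_, ?_⟩
  · intro y hy
    rw [← hp.count_eq, ← hp.count_eq]
    exact h2 y (hp.mem_iff.mpr hy)
  · intro y hy hc
    rw [← hp.count_eq, ← hp.count_eq] at hc
    exact h3 y (hp.mem_iff.mpr hy) hc

-- A side: A's mode expression returns the pvIsAns value of the sequence
theorem pvModeA_isAns (L : List Int) (hL : L ≠ []) :
    pvIsAns L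
      ((PySem.List.max?
        (PySem.Set.ofList (L.filter (fun x => (PySem.List.count L x : Int)
          == (PySem.List.max? (L.map (fun x => (PySem.List.count L x : Int))) (fun y => y)).getD 0)))
        (fun y => y)).getD 0) := by
  obtain ⟨c0, L', hLc⟩ : ∃ c0 L', L = c0 :: L' := by
    cases L with | nil => exact absurd rfl hL | cons a t => exact ⟨a, t, rfl⟩
  have hmapne : L.map (fun x => (PySem.List.count L x : Int)) ≠ [] := by simp [hLc]
  obtain ⟨M, hM⟩ : ∃ M, PySem.List.max? (L.map (fun x => (PySem.List.count L x : Int))) (fun y => y) = some M := by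
    cases hopt : PySem.List.max? (L.map (fun x => (PySem.List.count L x : Int))) (fun y => y) with
    | none => exact absurd ((PySem.List.max?_eq_none_iff _ _).mp hopt) hmapne
    | some M => exact ⟨M, rfl⟩
  obtain ⟨w, hwL, hwM⟩ : ∃ w ∈ L, (PySem.List.count L w : Int) = M := by
    have := PySem.List.max?_mem hM
    simpa using this
  have hMmax : ∀ y ∈ L, (PySem.List.count L y : Int) ≤ M := by
    intro y hy
    exact PySem.List.max?_isMax hM _ (List.mem_map_of_mem hy)
  rw [hM]
  set F := L.filter (fun x => (PySem.List.count L x : Int) == (some M).getD 0) with hF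
  have hwF : w ∈ F := by
    rw [hF]
    refine List.mem_filter.mpr ⟨hwL, ?_⟩
    simp only [Option.getD_some, beq_iff_eq]
    exact hwM
  obtain ⟨r, hr⟩ : ∃ r, PySem.List.max? (PySem.Set.ofList F) (fun y => y) = some r := by
    cases hopt : PySem.List.max? (PySem.Set.ofList F) (fun y => y) with
    | none =>
      have h1 : PySem.Set.ofList F = [] := (PySem.List.max?_eq_none_iff _ _).mp hopt
      have h2 : w ∈ PySem.Set.ofList F := (PySem.Set.mem_ofList _ _).mpr hwF
      simp_all
    | some r => exact ⟨r, rfl⟩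
  have hrF : r ∈ F := (PySem.Set.mem_ofList _ _).mp (PySem.List.max?_mem hr)
  have hrL : r ∈ L := (List.mem_filter.mp hrF).1
  have hrM : (PySem.List.count L r : Int) = M := by
    have := (List.mem_filter.mp hrF).2
    simpa using this
  have hrmax : ∀ y ∈ F, y ≤ r := by
    intro y hy
    exact PySem.List.max?_isMax hr _ ((PySem.Set.mem_ofList _ _).mpr hy)
  rw [hr]
  simp only [Option.getD_some]
  refine ⟨hrL, ?_, ?_⟩
  · intro y hy
    have := hMmax y hy
    have hc : (PySem.List.count L y : Int) ≤ (PySem.List.count L r : Int) := by omega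
    simpa [PySem.List.count] using hc
  · intro y hy hc
    have hyM : (PySem.List.count L y : Int) = M := by
      have : PySem.List.count L y = PySem.List.count L r := by simpa [PySem.List.count] using hc
      omega
    have hyF : y ∈ F := by
      rw [hF]
      refine List.mem_filter.mpr ⟨hy, ?_⟩
      simp only [Option.getD_some, beq_iff_eq]
      exact hyM
    exact hrmax y hyF

-- B side: the run sweep over a sorted list maintains, for the processed prefix P:
-- prev is the last (= largest) element, run its count, (bestRun, bestVal) the best (count, value).
theorem pvSweep_invariant (t : List Int) : ∀ (P : List Int) (prev run bestRun bestVal : Int),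
    (P ++ t).Pairwise (· ≤ ·) →
    prev ∈ P → (∀ y ∈ P, y ≤ prev) →
    run = (P.count prev : Int) →
    bestVal ∈ P → bestRun = (P.count bestVal : Int) →
    (∀ y ∈ P, (P.count y : Int) ≤ bestRun) →
    (∀ y ∈ P, (P.count y : Int) = bestRun → y ≤ bestVal) →
    pvIsAns (P ++ t) (t.foldl pvSweepStep (prev, run, bestRun, bestVal)).2.2.2 := by
  induction t with
  | nil =>
    intro P prev run bestRun bestVal _ _ _ _ hbv hbr hmax htie
    simp only [List.foldl_nil, List.append_nil]
    refine ⟨hbv, ?_, ?_⟩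
    · intro y hy; have := hmax y hy; omega
    · intro y hy hc; exact htie y hy (by omega)
  | cons x t ih =>
    intro P prev run bestRun bestVal hpw hprev hprevmax hrun hbv hbr hmax htie
    have hPx : ∀ y ∈ P, y ≤ x := by
      intro y hy
      exact (List.pairwise_append.mp hpw).2.2 y hy x (by simp)
    have happ : P ++ x :: t = (P ++ [x]) ++ t := by simp
    have hpw' : ((P ++ [x]) ++ t).Pairwise (· ≤ ·) := by rw [← happ]; exact hpw
    have hcount : ∀ y : Int, ((P ++ [x]).count y : Int)
        = (P.count y : Int) + (if y = x then 1 else 0) := by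
      intro y
      rw [List.count_append]
      rcases eq_or_ne y x with h | h
      · simp [h]
      · have h' : ¬ x = y := fun hh => h hh.symm
        simp [h, h']
    have hmemP : ∀ y, y ∈ P ++ [x] → y = x ∨ y ∈ P := by
      intro y hy
      rcases List.mem_append.mp hy with h | h
      · exact Or.inr h
      · exact Or.inl (by simpa using h)
    have hle_x : ∀ y ∈ P ++ [x], y ≤ x := by
      intro y hy
      rcases hmemP y hy with h | h
      · omega
      · exact hPx y h
    have hbrpos : 1 ≤ bestRun := by
      have := List.count_pos_iff.mpr hbv
      omega
    rw [happ]
    simp only [List.foldl_cons, pvSweepStep]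
    by_cases hx : x = prev
    · -- run extends: run' = run + 1 = count of x in P ++ [x]
      subst hx
      have hrun' : run + 1 = ((P ++ [x]).count x : Int) := by
        rw [hcount x, if_pos rfl]; omega
      rw [if_pos rfl]
      by_cases hge : run + 1 ≥ bestRun
      · rw [if_pos hge]
        refine ih (P ++ [x]) x (run + 1) (run + 1) x hpw' (by simp) hle_x hrun' (by simp) hrun' ?_ ?_
        · intro y hy
          rw [hcount y]
          by_cases hyx : y = x
          · rw [if_pos hyx]; subst hyx; omega
          · rw [if_neg hyx]
            rcases hmemP y hy with h | h
            · exact absurd h hyx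
            · have := hmax y h; omega
        · intro y hy _; exact hle_x y hy
      · rw [if_neg hge]
        -- bestVal ≠ x here: otherwise bestRun = count P x = run < run + 1 contradicts ¬hge
        have hbvx : bestVal ≠ x := by
          intro h
          rw [h] at hbr
          omega
        have hbr' : bestRun = ((P ++ [x]).count bestVal : Int) := by
          rw [hcount bestVal, if_neg hbvx]; omega
        refine ih (P ++ [x]) x (run + 1) bestRun bestVal hpw' (by simp) hle_x hrun'
          (by simp [hbv]) hbr' ?_ ?_
        · intro y hy
          rw [hcount y]
          by_cases hyx : y = x
          · rw [if_pos hyx]; subst hyx; omega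
          · rw [if_neg hyx]
            rcases hmemP y hy with h | h
            · exact absurd h hyx
            · have := hmax y h; omega
        · intro y hy hyc
          rw [hcount y] at hyc
          by_cases hyx : y = x
          · rw [if_pos hyx] at hyc; subst hyx; omega
          · rw [if_neg hyx] at hyc
            rcases hmemP y hy with h | h
            · exact absurd h hyx
            · exact htie y h (by omega)
    · -- new run: x ∉ P, run' = 1
      have hxprev : prev ≤ x := hPx prev hprev
      have hxP : x ∉ P := by
        intro h
        have := hprevmax x h
        exact hx (by omega)
      have hcPx : (P.count x : Int) = 0 := by
        rw [List.count_eq_zero_of_not_mem hxP]; rfl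
      have hcx : ((P ++ [x]).count x : Int) = 1 := by
        rw [hcount x, if_pos rfl]; omega
      by_cases hge : (1 : Int) ≥ bestRun
      · -- bestRun = 1: every count in P is 1, x (the largest) takes over
        rw [if_neg hx, if_pos hge]
        refine ih (P ++ [x]) x 1 1 x hpw' (by simp) hle_x hcx.symm (by simp) hcx.symm ?_ ?_
        · intro y hy
          rw [hcount y]
          by_cases hyx : y = x
          · rw [if_pos hyx]; subst hyx; omega
          · rw [if_neg hyx]
            rcases hmemP y hy with h | h
            · exact absurd h hyx
            · have := hmax y h; omega
        · intro y hy _; exact hle_x y hy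
      · rw [if_neg hx, if_neg hge]
        have hbvx : bestVal ≠ x := fun h => hxP (h ▸ hbv)
        have hbr' : bestRun = ((P ++ [x]).count bestVal : Int) := by
          rw [hcount bestVal, if_neg hbvx]; omega
        refine ih (P ++ [x]) x 1 bestRun bestVal hpw' (by simp) hle_x hcx.symm
          (by simp [hbv]) hbr' ?_ ?_
        · intro y hy
          rw [hcount y]
          by_cases hyx : y = x
          · rw [if_pos hyx]; subst hyx; omega
          · rw [if_neg hyx]
            rcases hmemP y hy with h | h
            · exact absurd h hyx
            · have := hmax y h; omega
        · intro y hy hyc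
          rw [hcount y] at hyc
          by_cases hyx : y = x
          · rw [if_pos hyx] at hyc; subst hyx; omega
          · rw [if_neg hyx] at hyc
            rcases hmemP y hy with h | h
            · exact absurd h hyx
            · exact htie y h (by omega)

-- B side, packaged: on a non-empty list, B's sort-and-sweep returns the pvIsAns value.
theorem pvSweepB_isAns (L : List Int) (hL : L ≠ []) :
    pvIsAns L (match PySem.List.sorted L (fun x => x) false with
               | [] => 0
               | h :: t => (t.foldl pvSweepStep (h, 1, 1, h)).2.2.2) := by
  have hperm : (PySem.List.sorted L (fun x => x) false).Perm L := PySem.List.sorted_perm _ _ _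
  have hpw : (PySem.List.sorted L (fun x => x) false).Pairwise (· ≤ ·) := by
    have := PySem.List.sorted_pairwise (xs := L) (key := fun x => x)
    simpa using this
  cases hs : PySem.List.sorted L (fun x => x) false with
  | nil =>
    exact absurd (hperm.symm.trans (hs ▸ List.Perm.refl _)).eq_nil hL
  | cons h t =>
    rw [hs] at hperm hpw
    refine pvIsAns_of_perm L (h :: t) hperm _ ?_
    have := pvSweep_invariant t [h] h 1 1 h (by simpa using hpw)
      (by simp) (by simp) (by simp) (by simp) (by simp) (by simp) (by simp)
    simpa using this

-- ===== VERDICT (by name: the statement is the Claim_ definition above) =====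
theorem mostFrequentDigitSum_spec : Claim_equal_mostFrequentDigitSum := by
  intro n _ _
  unfold Spec_mostFrequentDigitSum mostFrequentDigitSum mostFrequentDigitSum_alt
  rw [pvLoopB_eq_loopA]
  have hne := pvLoopA_ne_nil n.toNat n
  exact pvIsAns_unique _ _ _ (pvModeA_isAns _ hne) (pvSweepB_isAns _ hne)
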